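-- pv_equiv track=rewrite | github.com/Zenith1009/codeforces | contests/Round_985_Refactai/A_test.py | solve
-- ===== SOURCE A (Python) =====
-- def solve(l, r, k):
--     S = set(range(l, r + 1))
--
--     def count_multiples(x, S):
--
--         count = 0
--         curr_mult = x
--         while curr_mult <= r:
--             if curr_mult in S:
--                 count += 1
--             curr_mult += x
--         return count
--
--     operations = 0
--     while True:
--         found = False
--
--         for x in sorted(S):
--             if count_multiples(x, S) >= k:
--                 S.remove(x)
--                 operations += 1
--                 found = True
--                 break
--         if not found:
--             break
--
--     return operations
-- ===== SOURCE B (Python) =====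
-- def solve(l, r, k):
--     # Closed form: x in [l, r] is removable iff it has >= k multiples in [l, r],
--     # which (for l >= 1) is exactly floor(r/x) >= k, i.e. x <= r // k; removals
--     # in increasing order never disturb larger candidates' multiple counts.
--     if r < l:
--         return 0
--     if k <= 1:
--         return r - l + 1
--     return max(0, r // k - l + 1)
-- ===== Notes on version B (the rewrite author's own statement) =====
-- stated objective: faster
-- what changed: Replaces the repeated simulate-and-rescan removal loop over an explicit set with the closed-form count max(0, r//k - l + 1) (all of [l,r] when k <= 1), since x qualifies iff floor(r/x) >= k and removing smaller elements never changes larger elements' multiple counts.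
import Mathlib
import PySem

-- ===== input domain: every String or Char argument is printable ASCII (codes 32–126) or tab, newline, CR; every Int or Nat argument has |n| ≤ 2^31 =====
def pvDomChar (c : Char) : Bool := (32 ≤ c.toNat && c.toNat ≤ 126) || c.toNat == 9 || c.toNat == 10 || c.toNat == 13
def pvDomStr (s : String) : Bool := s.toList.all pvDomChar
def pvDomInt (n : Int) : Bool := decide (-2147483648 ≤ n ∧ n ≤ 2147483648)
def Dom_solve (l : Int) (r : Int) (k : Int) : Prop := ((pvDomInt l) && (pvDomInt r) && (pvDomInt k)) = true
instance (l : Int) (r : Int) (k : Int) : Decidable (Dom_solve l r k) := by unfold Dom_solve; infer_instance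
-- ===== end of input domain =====

-- B replaces A's simulate-and-rescan removal loop with the closed form max(0, r//k - l + 1)
-- (all of [l,r] when k ≤ 1); asymptotically faster. Equivalence is on the return value.

-- ===== PORT A =====
-- inner 'while curr_mult <= r' loop of count_multiples; fuel bounds the iteration count
-- (under Pre_solve every element x satisfies x ≥ 1, so each step grows curr by ≥ 1 and
-- (r - x).toNat + 1 iterations always suffice)
def cmLoop (x : Int) (r : Int) (S : PySem.Set Int) : Nat → Int → Int → Int
  | 0, _, count => count
  | fuel+1, curr, count =>
    if curr ≤ r then
      cmLoop x r S fuel (curr + x) (if PySem.Set.contains S curr then count + 1 else count)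
    else count

def countMultiples (x : Int) (r : Int) (S : PySem.Set Int) : Int :=
  cmLoop x r S ((r - x).toNat + 1) x 0

-- 'for x in sorted(S): if count_multiples(x, S) >= k: … break' — first qualifying x
def findQual (r : Int) (k : Int) (S : PySem.Set Int) : List Int → Option Int
  | [] => none
  | x :: rest => if countMultiples x r S ≥ k then some x else findQual r k S rest

-- 'while True' loop; each iteration removes one element, so |S| + 1 fuel always suffices
def outerLoop (r : Int) (k : Int) : Nat → PySem.Set Int → Int → Int
  | 0, _, ops => ops
  | fuel+1, S, ops =>
    match findQual r k S (PySem.List.sorted S (fun y => y) false) with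
    | some x => outerLoop r k fuel ((PySem.Set.remove? S x).getD S) (ops + 1)
    | none => ops

def solve (l : Int) (r : Int) (k : Int) : Int :=
  let S : PySem.Set Int := PySem.Set.ofList (PySem.List.pyRange l (r + 1) 1)
  outerLoop r k (S.length + 1) S 0

-- ===== PORT B =====
def solve_alt (l : Int) (r : Int) (k : Int) : Int :=
  if r < l then 0
  else if k ≤ 1 then r - l + 1
  else max 0 (PySem.Int.floordiv r k - l + 1)

-- ===== PRECONDITION & SPEC =====
-- Pre_ excludes l ≤ 0 ≤ r-ish inputs with a nonempty range: there A's inner while loop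
-- never terminates (curr_mult stalls at 0 or decreases), so A returns no value at all.
def Pre_solve (l : Int) (r : Int) (k : Int) : Prop := r < l ∨ 1 ≤ l
instance (l : Int) (r : Int) (k : Int) : Decidable (Pre_solve l r k) := by unfold Pre_solve; infer_instance
def pvWitness_solve : Int × Int × Int := (2, 10, 2)

def Spec_solve (l : Int) (r : Int) (k : Int) (out : Int) : Prop := out = solve_alt l r k
instance (l : Int) (r : Int) (k : Int) (out : Int) : Decidable (Spec_solve l r k out) := by unfold Spec_solve; infer_instance

-- ===== CLAIM (what is proved, stated in full; the proofs are below) =====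
def Claim_equal_solve : Prop := ∀ (l : Int) (r : Int) (k : Int), Dom_solve l r k → Pre_solve l r k → Spec_solve l r k (solve l r k)

-- ===== LEMMAS AND PROOFS =====

-- closed form of the inner loop when every visited point (all ≥ x) is in S
theorem cmLoop_closed (x r : Int) (S : PySem.Set Int) (hx : 1 ≤ x)
    (hS : ∀ m : Int, x ≤ m → m ≤ r → PySem.Set.contains S m = true) :
    ∀ (fuel : Nat) (curr count : Int), x ≤ curr → (r - curr + 1).toNat ≤ fuel →
      cmLoop x r S fuel curr count =
        count + (if curr ≤ r then (((r - curr).toNat / x.toNat : Nat) : Int) + 1 else 0) := by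
  intro fuel
  induction fuel with
  | zero =>
    intro curr count _ h
    have hcr : ¬ curr ≤ r := by omega
    simp only [cmLoop]
    rw [if_neg hcr]
    ring
  | succ fuel ih =>
    intro curr count hxc hfuel
    by_cases hcr : curr ≤ r
    · have hcontains : PySem.Set.contains S curr = true := hS curr hxc hcr
      simp only [cmLoop]
      rw [if_pos hcr, if_pos hcontains]
      have hx2 : x ≤ curr + x := by omega
      have hf2 : (r - (curr + x) + 1).toNat ≤ fuel := by omega
      rw [ih (curr + x) (count + 1) hx2 hf2]
      rw [if_pos hcr]
      by_cases hcr2 : curr + x ≤ r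
      · rw [if_pos hcr2]
        have hble : x.toNat ≤ (r - curr).toNat := by omega
        have hsub : (r - (curr + x)).toNat = (r - curr).toNat - x.toNat := by omega
        have hdiv : (r - curr).toNat / x.toNat = ((r - curr).toNat - x.toNat) / x.toNat + 1 :=
          Nat.div_eq_sub_div (by omega : 0 < x.toNat) hble
        rw [hsub, hdiv]
        push_cast
        ring
      · rw [if_neg hcr2]
        have hdiv : (r - curr).toNat / x.toNat = 0 := Nat.div_eq_of_lt (by omega)
        rw [hdiv]
        push_cast
        ring
    · simp only [cmLoop]
      rw [if_neg hcr, if_neg hcr]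
      ring

theorem countMultiples_closed (x r : Int) (S : PySem.Set Int) (hx : 1 ≤ x) (hxr : x ≤ r)
    (hS : ∀ m : Int, x ≤ m → m ≤ r → PySem.Set.contains S m = true) :
    countMultiples x r S = (((r - x).toNat / x.toNat : Nat) : Int) + 1 := by
  unfold countMultiples
  rw [cmLoop_closed x r S hx hS ((r - x).toNat + 1) x 0 le_rfl (by omega)]
  rw [if_pos hxr]
  ring

-- qualification test: for 1 ≤ x ≤ r, count ≥ k ↔ (k ≤ 1 ∨ x*k ≤ r)
theorem qual_iff (x r k : Int) (S : PySem.Set Int) (hx : 1 ≤ x) (hxr : x ≤ r)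
    (hS : ∀ m : Int, x ≤ m → m ≤ r → PySem.Set.contains S m = true) :
    (countMultiples x r S ≥ k) ↔ (k ≤ 1 ∨ x * k ≤ r) := by
  rw [countMultiples_closed x r S hx hxr hS]
  generalize hD : (r - x).toNat / x.toNat = D
  by_cases hk : k ≤ 1
  · constructor
    · intro _; exact Or.inl hk
    · intro _; omega
  · have hk2 : 2 ≤ k := by omega
    have hkey : (k - 1).toNat * x.toNat ≤ (r - x).toNat ↔ x * k ≤ r := by
      rw [← Nat.cast_le (α := Int)]
      have a1 : (((k - 1).toNat : Nat) : Int) = k - 1 := by omega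
      have a2 : ((x.toNat : Nat) : Int) = x := by omega
      have e3 : (((r - x).toNat : Nat) : Int) = r - x := by omega
      push_cast
      rw [a1, a2, e3]
      constructor
      · intro h; nlinarith
      · intro h; nlinarith
    constructor
    · intro hge
      right
      have h1 : (k - 1).toNat ≤ D := by omega
      rw [← hD] at h1
      exact hkey.mp ((Nat.le_div_iff_mul_le (by omega : 0 < x.toNat)).mp h1)
    · intro h
      have hxk : x * k ≤ r := h.resolve_left hk
      have h1 : (k - 1).toNat ≤ (r - x).toNat / x.toNat :=
        (Nat.le_div_iff_mul_le (by omega : 0 < x.toNat)).mpr (hkey.mpr hxk)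
      rw [hD] at h1
      omega

-- floor-division brackets used to compare against B's closed form
theorem fdiv_ge_of_mul_le (r k c : Int) (hk : 0 < k) (h : c * k ≤ r) :
    c ≤ PySem.Int.floordiv r k :=
  (PySem.Int.le_floordiv_iff_mul_le hk).mpr h

theorem fdiv_lt_of_lt_mul (r k c : Int) (hk : 0 < k) (h : r < c * k) :
    PySem.Int.floordiv r k < c := by
  by_contra hle
  push_neg at hle
  have h2 := (PySem.Int.le_floordiv_iff_mul_le hk).mp hle
  linarith

-- membership of the interval [c, r] (as the set built from range(c, r+1))
theorem contains_interval (c r m : Int) (h1 : c ≤ m) (h2 : m ≤ r) :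
    PySem.Set.contains (PySem.List.pyRange c (r + 1) 1) m = true :=
  (PySem.Set.contains_iff _ _).mpr (PySem.List.mem_pyRange_one.mpr ⟨h1, by omega⟩)

-- no element of [d, r] qualifies when k ≥ 2 and c*k > r (c ≤ d)
theorem findQual_none (r k c : Int) (hc : 1 ≤ c) (hk : 2 ≤ k) (hck : r < c * k) :
    ∀ (n : Nat) (d : Int), c ≤ d → (r + 1 - d).toNat = n →
      findQual r k (PySem.List.pyRange c (r + 1) 1) (PySem.List.pyRange d (r + 1) 1) = none := by
  intro n
  induction n with
  | zero =>
    intro d hcd hn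
    rw [PySem.List.pyRange_one_eq_nil (by omega : r + 1 ≤ d)]
    rfl
  | succ n ih =>
    intro d hcd hn
    have hdr : d ≤ r := by omega
    rw [PySem.List.pyRange_one_cons (by omega : d < r + 1)]
    have hS : ∀ m : Int, d ≤ m → m ≤ r → PySem.Set.contains (PySem.List.pyRange c (r + 1) 1) m = true :=
      fun m hm1 hm2 => contains_interval c r m (by omega) hm2
    have hmono : c * k ≤ d * k := mul_le_mul_of_nonneg_right hcd (by omega)
    have hnot : ¬ (countMultiples d r (PySem.List.pyRange c (r + 1) 1) ≥ k) := by
      rw [qual_iff d r k _ (by omega) hdr hS]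
      rintro (h | h)
      · omega
      · linarith
    simp only [findQual]
    rw [if_neg hnot]
    exact ih (d + 1) (by omega) (by omega)

-- the tail [c+1, r] is what removing c from [c, r] leaves
theorem discard_interval (c r : Int) :
    PySem.Set.discard (c :: PySem.List.pyRange (c + 1) (r + 1) 1) c =
      PySem.List.pyRange (c + 1) (r + 1) 1 := by
  unfold PySem.Set.discard
  rw [List.filter_cons]
  simp only [beq_self_eq_true, Bool.not_true]
  rw [if_neg (by simp)]
  apply List.filter_eq_self.mpr
  intro a ha
  have hm := PySem.List.mem_pyRange_one.mp ha
  simp [show a ≠ c by omega]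

-- main invariant of the outer loop over the remaining interval [c, r]
theorem outerLoop_interval (r k : Int) :
    ∀ (fuel : Nat) (c ops : Int), 1 ≤ c → (r + 1 - c).toNat < fuel →
      outerLoop r k fuel (PySem.List.pyRange c (r + 1) 1) ops =
        ops + (if k ≤ 1 then max 0 (r - c + 1) else max 0 (PySem.Int.floordiv r k - c + 1)) := by
  intro fuel
  induction fuel with
  | zero => intro c ops _ h; omega
  | succ fuel ih =>
    intro c ops hc hfuel
    have hsorted : PySem.List.sorted (PySem.List.pyRange c (r + 1) 1) (fun y => y) false =
        PySem.List.pyRange c (r + 1) 1 :=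
      PySem.List.sorted_eq_self_of_pairwise _ _
        ((PySem.List.pairwise_lt_pyRange_one c (r + 1)).imp (fun h => le_of_lt h))
    by_cases hcr : c ≤ r
    · have hS : ∀ m : Int, c ≤ m → m ≤ r →
          PySem.Set.contains (PySem.List.pyRange c (r + 1) 1) m = true :=
        fun m hm1 hm2 => contains_interval c r m hm1 hm2
      by_cases hqual : k ≤ 1 ∨ c * k ≤ r
      · have hcm : countMultiples c r (PySem.List.pyRange c (r + 1) 1) ≥ k :=
          (qual_iff c r k _ (by omega) hcr hS).mpr hqual
        have hmem : c ∈ PySem.List.pyRange c (r + 1) 1 :=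
          PySem.List.mem_pyRange_one.mpr ⟨le_rfl, by omega⟩
        have hrem : PySem.Set.remove? (PySem.List.pyRange c (r + 1) 1) c =
            some (PySem.List.pyRange (c + 1) (r + 1) 1) := by
          rw [PySem.Set.remove?_of_mem hmem]
          rw [show PySem.List.pyRange c (r + 1) 1 = c :: PySem.List.pyRange (c + 1) (r + 1) 1
                from PySem.List.pyRange_one_cons (by omega)]
          rw [discard_interval]
        have hfind : findQual r k (PySem.List.pyRange c (r + 1) 1) (PySem.List.pyRange c (r + 1) 1) =
            some c := by
          rw [show PySem.List.pyRange c (r + 1) 1 = c :: PySem.List.pyRange (c + 1) (r + 1) 1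
                from PySem.List.pyRange_one_cons (by omega)] at hcm ⊢
          · simp only [findQual]
            rw [if_pos hcm]
        simp only [outerLoop]
        rw [hsorted, hfind]
        show outerLoop r k fuel
            ((PySem.Set.remove? (PySem.List.pyRange c (r + 1) 1) c).getD
              (PySem.List.pyRange c (r + 1) 1)) (ops + 1) = _
        rw [hrem]
        simp only [Option.getD_some]
        rw [ih (c + 1) (ops + 1) (by omega) (by omega)]
        rcases hqual with hk1 | hck
        · rw [if_pos hk1, if_pos hk1]
          omega
        · by_cases hk1 : k ≤ 1
          · rw [if_pos hk1, if_pos hk1]; omega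
          · rw [if_neg hk1, if_neg hk1]
            have hq : c ≤ PySem.Int.floordiv r k := fdiv_ge_of_mul_le r k c (by omega) hck
            omega
      · push_neg at hqual
        have hk2 : 2 ≤ k := by omega
        have hck : r < c * k := hqual.2
        have hfind := findQual_none r k c hc hk2 hck (r + 1 - c).toNat c le_rfl rfl
        simp only [outerLoop]
        rw [hsorted, hfind]
        show ops = _
        have hq : PySem.Int.floordiv r k < c := fdiv_lt_of_lt_mul r k c (by omega) hck
        rw [if_neg (by omega : ¬ k ≤ 1)]
        omega
    · have hnil : PySem.List.pyRange c (r + 1) 1 = [] :=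
        PySem.List.pyRange_one_eq_nil (by omega)
      simp only [outerLoop]
      rw [hnil]
      have hfind : findQual r k ([] : List Int) (PySem.List.sorted ([] : List Int) (fun y => y) false) = none := rfl
      rw [hfind]
      show ops = _
      have hck : r < c * k ∨ k ≤ 1 := by
        by_cases hk1 : k ≤ 1
        · exact Or.inr hk1
        · left
          have : c ≤ c * k := le_mul_of_one_le_right (by omega) (by omega)
          omega
      by_cases hk1 : k ≤ 1
      · rw [if_pos hk1]; omega
      · rw [if_neg hk1]
        have hq : PySem.Int.floordiv r k < c :=
          fdiv_lt_of_lt_mul r k c (by omega) (hck.resolve_right hk1)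
        omega

-- ===== VERDICT (by name: the statement is the Claim_ definition above) =====
theorem solve_spec : Claim_equal_solve := by
  intro l r k _hdom hpre
  unfold Spec_solve
  show outerLoop r k _ _ 0 = _
  rw [PySem.Set.ofList_eq_self_of_nodup _ (PySem.List.nodup_pyRange_one l (r + 1))]
  rw [PySem.List.length_pyRange_one]
  by_cases hl : 1 ≤ l
  · rw [outerLoop_interval r k ((r + 1 - l).toNat + 1) l 0 hl (by omega)]
    unfold solve_alt
    have hfd : 2 ≤ k → r < l → PySem.Int.floordiv r k < l := fun hk2 hrl =>
      fdiv_lt_of_lt_mul r k l (by omega)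
        (by have : l ≤ l * k := le_mul_of_one_le_right (by omega) (by omega); omega)
    generalize hq : PySem.Int.floordiv r k = q at hfd ⊢
    split_ifs <;> first | omega | (have := hfd (by omega) (by omega); omega)
  · have hrl : r < l := hpre.resolve_right hl
    rw [PySem.List.pyRange_one_eq_nil (by omega)]
    unfold solve_alt
    rw [if_pos hrl]
    rfl
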